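-- pv_equiv track=rewrite | github.com/xBirch/adventofcode | 2023/day7.py | check_five_of_a_kind
-- ===== SOURCE A (Python) =====
-- from collections import defaultdict
--
-- def check_five_of_a_kind(hand):
--     values = [*hand[0]]
--     value_counts = defaultdict(lambda:0)
--     for v in values:
--         value_counts[v]+=1
--     if sorted(value_counts.values()) == [1,5]:
--         return hand[1]
--     return 0
-- ===== SOURCE B (Python) =====
-- def check_five_of_a_kind(hand):
--     # sort-then-group: run lengths of the sorted hand are the value counts
--     t = sorted(hand[0])
--     counts = []
--     for c in t:
--         if counts and c == prev:
--             counts[0] += 1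
--         else:
--             counts.insert(0, 1)
--         prev = c
--     return hand[1] if sorted(counts) == [1, 5] else 0
-- ===== Notes on version B (the rewrite author's own statement) =====
-- stated objective: alternative
-- what changed: B replaces A's defaultdict frequency map by sorting the hand and collecting run lengths in a single scan (prepending and bumping the current run), then compares the sorted run lengths to [1,5].
import Mathlib
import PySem

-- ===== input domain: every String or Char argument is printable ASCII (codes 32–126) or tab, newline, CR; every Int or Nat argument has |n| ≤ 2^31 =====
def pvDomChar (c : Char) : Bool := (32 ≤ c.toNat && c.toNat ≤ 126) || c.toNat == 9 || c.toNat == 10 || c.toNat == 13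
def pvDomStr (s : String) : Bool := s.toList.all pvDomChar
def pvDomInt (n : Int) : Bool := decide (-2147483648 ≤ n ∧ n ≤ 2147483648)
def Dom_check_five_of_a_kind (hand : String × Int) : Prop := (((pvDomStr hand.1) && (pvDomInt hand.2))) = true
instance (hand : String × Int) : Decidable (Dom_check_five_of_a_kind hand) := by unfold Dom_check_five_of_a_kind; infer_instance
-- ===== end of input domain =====

-- B groups equal cards by sorting the hand and collecting run lengths instead of A's dictionary of counts (alternative decomposition, same cost class).

-- ===== PORT A =====
def check_five_of_a_kind (hand : String × Int) : Int :=
  let values := hand.1.toList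
  let value_counts := values.foldl (fun d v => d.modify v 0 (· + 1)) (PySem.Dict.empty : PySem.Dict Char Int)
  if PySem.List.sorted value_counts.values (fun x => x) false = [1, 5] then hand.2 else 0

-- ===== PORT B =====
-- one step of B's run-length loop; Python's `prev` is unbound before the first pass but
-- only read when `counts` is non-empty, so the initial Char below is never read
def cfoakStep (st : List Int × Char) (c : Char) : List Int × Char :=
  match st with
  | (h :: rest, prev) => if c = prev then ((h + 1) :: rest, c) else (1 :: h :: rest, c)
  | ([], _) => ([1], c)

def check_five_of_a_kind_alt (hand : String × Int) : Int :=
  let t := PySem.List.sorted hand.1.toList (fun x => x) false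
  let counts := (t.foldl cfoakStep ([], 'a')).1
  if PySem.List.sorted counts (fun x => x) false = [1, 5] then hand.2 else 0

-- ===== PRECONDITION & SPEC =====
def Spec_check_five_of_a_kind (hand : String × Int) (out : Int) : Prop := out = check_five_of_a_kind_alt hand
instance (hand : String × Int) (out : Int) : Decidable (Spec_check_five_of_a_kind hand out) := by unfold Spec_check_five_of_a_kind; infer_instance

-- ===== CLAIM (what is proved, stated in full; the proofs are below) =====
def Claim_equal_check_five_of_a_kind : Prop := ∀ (hand : String × Int), Dom_check_five_of_a_kind hand → Spec_check_five_of_a_kind hand (check_five_of_a_kind hand)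

-- ===== LEMMAS AND PROOFS =====

-- A's loop is Counter; its values are the counts of the distinct characters
theorem cfoak_values_A (cs : List Char) :
    (cs.foldl (fun d v => d.modify v 0 (· + 1)) (PySem.Dict.empty : PySem.Dict Char Int)).values
      = (PySem.Set.ofList cs).map (fun k => (List.count k cs : Int)) := by
  rw [← PySem.Dict.counter_eq_foldl]
  simp [PySem.Dict.values, PySem.Dict.items_counter]

theorem cfoak_discard_ofList_cons_self (x : Char) (t' : List Char) :
    PySem.Set.discard (PySem.Set.ofList (x :: t')) x = PySem.Set.discard (PySem.Set.ofList t') x := by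
  rw [PySem.Set.ofList_cons]
  simp [PySem.Set.discard, List.filter_filter]

theorem cfoak_map_count_discard_cons (x : Char) (t' : List Char) :
    (PySem.Set.discard (PySem.Set.ofList t') x).map (fun k => (List.count k (x :: t') : Int))
      = (PySem.Set.discard (PySem.Set.ofList t') x).map (fun k => (List.count k t' : Int)) := by
  apply List.map_congr_left
  intro k hk
  have hkx : x ≠ k := by
    simp [PySem.Set.discard, List.mem_filter] at hk
    exact fun h => hk.2 h.symm
  rw [List.count_cons_of_ne hkx]

theorem cfoak_map_count_ofList_cons (x : Char) (t' : List Char) :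
    (((PySem.Set.ofList (x :: t')).map (fun k => (List.count k (x :: t') : Int)) : List Int) : Multiset Int)
      = ((List.count x t' : Int) + 1) ::ₘ
          (((PySem.Set.discard (PySem.Set.ofList t') x).map (fun k => (List.count k t' : Int)) : List Int) : Multiset Int) := by
  rw [PySem.Set.ofList_cons]
  show (((List.count x (x :: t') : Int) :: ((PySem.Set.ofList t').discard x).map (fun k => (List.count k (x :: t') : Int)) : List Int) : Multiset Int) = _
  rw [← Multiset.cons_coe, List.count_cons_self, cfoak_map_count_discard_cons]
  push_cast
  rfl

-- the run-length loop over a sorted suffix, with `prev` ≤ every later card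
theorem cfoak_runG : ∀ (t : List Char), t.Pairwise (· ≤ ·) →
    ∀ (prev : Char) (c0 : Int) (cs : List Int), (∀ x ∈ t, prev ≤ x) →
      (((t.foldl cfoakStep (c0 :: cs, prev)).1 : List Int) : Multiset Int)
        = (c0 + (List.count prev t : Int)) ::ₘ
            (((PySem.Set.discard (PySem.Set.ofList t) prev).map (fun k => (List.count k t : Int)) : List Int) : Multiset Int)
            + (cs : Multiset Int) := by
  intro t
  induction t with
  | nil =>
    intro _ prev c0 cs _
    simp [PySem.Set.discard]
  | cons x t' ih =>
    intro ht prev c0 cs hle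
    obtain ⟨hx, ht'⟩ := List.pairwise_cons.mp ht
    by_cases hxp : x = prev
    · subst hxp
      rw [List.foldl_cons, show cfoakStep (c0 :: cs, x) x = ((c0 + 1) :: cs, x) by simp [cfoakStep]]
      rw [ih ht' x (c0 + 1) cs hx]
      rw [cfoak_discard_ofList_cons_self, cfoak_map_count_discard_cons, List.count_cons_self]
      push_cast
      rw [show c0 + 1 + (List.count x t' : Int) = c0 + ((List.count x t' : Int) + 1) from by ring]
    · have hxp' : prev ≠ x := fun h => hxp h.symm
      have hpx : prev < x := lt_of_le_of_ne (hle x (List.mem_cons_self)) hxp'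
      have hnm : prev ∉ x :: t' := by
        intro hm
        rcases List.mem_cons.mp hm with h | hm
        · exact hxp' h
        · exact absurd (hx _ hm) (not_le.mpr hpx)
      rw [List.foldl_cons, show cfoakStep (c0 :: cs, prev) x = (1 :: c0 :: cs, x) by simp [cfoakStep, hxp]]
      rw [ih ht' x 1 (c0 :: cs) hx]
      rw [show PySem.Set.discard (PySem.Set.ofList (x :: t')) prev = PySem.Set.ofList (x :: t') from
        List.filter_eq_self.mpr (fun a ha => by
          have : a ∈ x :: t' := (PySem.Set.mem_ofList _ _).mp ha
          have : a ≠ prev := fun h => hnm (h ▸ this)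
          simpa using this)]
      rw [List.count_eq_zero.mpr hnm, cfoak_map_count_ofList_cons]
      rw [show ((1 : Int) + (List.count x t' : Int)) = ((List.count x t' : Int) + 1) from by ring, ← Multiset.cons_coe]
      push_cast
      simp only [add_zero, Multiset.cons_add, Multiset.add_cons]

-- B's counts are a permutation of the counts of the distinct characters of t
theorem cfoak_counts_B (t : List Char) (ht : t.Pairwise (· ≤ ·)) :
    (((t.foldl cfoakStep ([], 'a')).1 : List Int) : Multiset Int)
      = (((PySem.Set.ofList t).map (fun k => (List.count k t : Int)) : List Int) : Multiset Int) := by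
  cases t with
  | nil => rfl
  | cons x t' =>
    obtain ⟨hx, ht'⟩ := List.pairwise_cons.mp ht
    rw [List.foldl_cons, show cfoakStep ([], 'a') x = ([1], x) from rfl]
    rw [cfoak_runG t' ht' x 1 [] hx, cfoak_map_count_ofList_cons]
    rw [show ((1 : Int) + (List.count x t' : Int)) = ((List.count x t' : Int) + 1) from by ring]
    simp

-- ===== VERDICT (by name: the statement is the Claim_ definition above) =====
theorem check_five_of_a_kind_spec : Claim_equal_check_five_of_a_kind := by
  intro hand _
  unfold Spec_check_five_of_a_kind check_five_of_a_kind check_five_of_a_kind_alt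
  show (if PySem.List.sorted (hand.1.toList.foldl (fun d v => d.modify v 0 (· + 1)) (PySem.Dict.empty : PySem.Dict Char Int)).values (fun x => x) false = [1, 5] then hand.2 else 0)
      = (if PySem.List.sorted (((PySem.List.sorted hand.1.toList (fun x => x) false).foldl cfoakStep ([], 'a')).1) (fun x => x) false = [1, 5] then hand.2 else 0)
  set cs := hand.1.toList with hcs
  set t := PySem.List.sorted cs (fun x => x) false with htdef
  have htp : t.Pairwise (· ≤ ·) := PySem.List.sorted_pairwise cs (fun x => x)
  have hperm : t.Perm cs := PySem.List.sorted_perm cs (fun x => x) false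
  have hmap : ((PySem.Set.ofList t).map (fun k => (List.count k t : Int))).Perm
      ((PySem.Set.ofList cs).map (fun k => (List.count k cs : Int))) := by
    have hof : (PySem.Set.ofList t).Perm (PySem.Set.ofList cs) :=
      (List.perm_ext_iff_of_nodup (PySem.Set.nodup_ofList t) (PySem.Set.nodup_ofList cs)).mpr
        (fun a => by simp [PySem.Set.mem_ofList, hperm.mem_iff])
    have hfun : (fun k => (List.count k t : Int)) = (fun k => (List.count k cs : Int)) := by
      funext k; rw [hperm.count_eq]
    rw [hfun]
    exact hof.map _
  have hperm2 : ((t.foldl cfoakStep ([], 'a')).1).Perm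
      ((cs.foldl (fun d v => d.modify v 0 (· + 1)) (PySem.Dict.empty : PySem.Dict Char Int)).values) := by
    rw [cfoak_values_A]
    apply Multiset.coe_eq_coe.mp
    rw [cfoak_counts_B t htp]
    exact Multiset.coe_eq_coe.mpr hmap
  have hs := PySem.List.sorted_eq_sorted_of_perm _ _ (fun x : Int => x) (fun _ _ h => h) hperm2
  rw [hs]
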